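-- pv_equiv track=rewrite | github.com/kaylode/k-anonymity | algorithms/mondrian/__init__.py | restore_num_to_cat
-- ===== SOURCE A (Python) =====
-- def restore_num_to_cat(mapping_dict, data, qi_index, is_cat):
--     new_data = []
--     for record in data:
--         new_record = []
--         for i in range(len(record)):
--             value = record[i]
--             if i in qi_index:
--                 pos = qi_index.index(i)
--                 if is_cat[pos]:
--                     # If only caterogical, restore back
--                     tokens = value.split('~')
--                     if len(tokens) > 1:
--                         start = int(tokens[0])
--                         end = int(tokens[1])
--                         value_range = range(start, end+1)
--                     else:
--                         value_range = [int(tokens[0])]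
--                     restored_value = '~'.join([mapping_dict[pos][j] for j in value_range])
--                     new_record.append(restored_value)
--                 else:
--                     new_record.append(value)
--             else:
--                 new_record.append(value)
--         new_data.append(new_record)
--     return new_data
-- ===== SOURCE B (Python) =====
-- def restore_num_to_cat(mapping_dict, data, qi_index, is_cat):
--     # Distinct QI columns, each with its first position in qi_index.
--     qi_pairs = [(i, qi_index.index(i)) for i in dict.fromkeys(qi_index)]
--     new_data = []
--     for record in data:
--         new_record = list(record)
--         for i, pos in qi_pairs:
--             if 0 <= i < len(record) and is_cat[pos]:
--                 tokens = record[i].split('~')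
--                 start = int(tokens[0])
--                 end = int(tokens[1]) if len(tokens) > 1 else start
--                 new_record[i] = '~'.join(mapping_dict[pos][j]
--                                          for j in range(start, end + 1))
--         new_data.append(new_record)
--     return new_data
-- ===== Notes on version B (the rewrite author's own statement) =====
-- stated objective: faster
-- what changed: B inverts the traversal: instead of scanning every cell and testing `i in qi_index`/.index per cell, it precomputes the distinct QI columns with their first positions once, then copies each record and overwrites in place only the categorical QI cells.
import Mathlib
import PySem

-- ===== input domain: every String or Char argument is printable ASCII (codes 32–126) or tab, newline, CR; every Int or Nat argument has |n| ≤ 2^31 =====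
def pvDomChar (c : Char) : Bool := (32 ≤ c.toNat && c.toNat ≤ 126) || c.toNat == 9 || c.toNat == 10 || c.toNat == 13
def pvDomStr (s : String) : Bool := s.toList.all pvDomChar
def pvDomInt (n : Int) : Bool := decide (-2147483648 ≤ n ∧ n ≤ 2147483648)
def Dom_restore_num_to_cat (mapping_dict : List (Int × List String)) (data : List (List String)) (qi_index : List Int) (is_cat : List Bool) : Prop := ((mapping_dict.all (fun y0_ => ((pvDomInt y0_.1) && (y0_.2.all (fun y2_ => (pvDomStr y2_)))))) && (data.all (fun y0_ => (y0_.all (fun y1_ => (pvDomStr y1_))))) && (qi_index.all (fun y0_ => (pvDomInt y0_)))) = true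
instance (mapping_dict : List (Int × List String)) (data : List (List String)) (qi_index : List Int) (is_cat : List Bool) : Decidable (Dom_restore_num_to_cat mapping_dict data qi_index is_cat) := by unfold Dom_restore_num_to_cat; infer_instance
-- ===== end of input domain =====

-- B inverts the traversal: one precomputed list of distinct QI columns with their first positions, then each record is copied and only its categorical QI cells overwritten in place (objective: faster).


-- ===== PORT A =====
-- '~'.join([mapping_dict[pos][j] for j in value_range])  (getD defaults are never hit inside Pre_)
def pvA_join (mapping_dict : List (Int × List String)) (pos : Int) (value_range : List Int) : String :=
  PySem.Str.join "~" (value_range.map (fun j =>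
    (PySem.List.pyGet? ((PySem.Dict.get? (PySem.Dict.mk mapping_dict) pos).getD []) j).getD ""))

-- the `if len(tokens) > 1 … range(start, end+1) … else [int(tokens[0])]` block
def pvA_range (tokens : List String) : List Int :=
  if tokens.length > 1 then
    PySem.List.pyRange ((PySem.Int.ofStr? (PySem.List.pyGetD tokens 0 "")).getD 0)
      (((PySem.Int.ofStr? (PySem.List.pyGetD tokens 1 "")).getD 0) + 1) 1
  else [(PySem.Int.ofStr? (PySem.List.pyGetD tokens 0 "")).getD 0]

def pvA_cell (mapping_dict : List (Int × List String)) (qi_index : List Int) (is_cat : List Bool) (i : Int) (value : String) : String :=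
  if qi_index.contains i then
    let pos : Nat := (PySem.List.index? qi_index i).getD 0
    if PySem.List.pyGetD is_cat (pos : Int) false then
      pvA_join mapping_dict (pos : Int) (pvA_range ((PySem.Str.split? value "~").getD []))
    else value
  else value

def restore_num_to_cat (mapping_dict : List (Int × List String)) (data : List (List String)) (qi_index : List Int) (is_cat : List Bool) : List (List String) :=
  data.foldl (fun new_data record =>
    new_data ++ [(PySem.List.pyRange 0 (record.length : Int) 1).foldl (fun new_record i =>
      new_record ++ [pvA_cell mapping_dict qi_index is_cat i (PySem.List.pyGetD record i "")]) []]) []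

-- ===== PORT B =====
-- [(i, qi_index.index(i)) for i in dict.fromkeys(qi_index)]  (i ∈ qi_index, so .index never raises; getD 0 unreachable)
def pvB_pairs (qi_index : List Int) : List (Int × Int) :=
  (PySem.List.dedup qi_index).map (fun i => (i, (((PySem.List.index? qi_index i).getD 0 : Nat) : Int)))

-- end = int(tokens[1]) if len(tokens) > 1 else start
def pvB_stop (tokens : List String) : Int :=
  if tokens.length > 1 then (PySem.Int.ofStr? (PySem.List.pyGetD tokens 1 "")).getD 0
  else (PySem.Int.ofStr? (PySem.List.pyGetD tokens 0 "")).getD 0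

-- the body of the overwrite: tokens/start/end/'~'.join(... for j in range(start, end+1))
def pvB_restore (mapping_dict : List (Int × List String)) (pos : Int) (value : String) : String :=
  PySem.Str.join "~" ((PySem.List.pyRange
      ((PySem.Int.ofStr? (PySem.List.pyGetD ((PySem.Str.split? value "~").getD []) 0 "")).getD 0)
      (pvB_stop ((PySem.Str.split? value "~").getD []) + 1) 1).map (fun j =>
    (PySem.List.pyGet? ((PySem.Dict.get? (PySem.Dict.mk mapping_dict) pos).getD []) j).getD ""))

-- if 0 <= i < len(record) and is_cat[pos]: new_record[i] = …  (in-range List.set is Python's item assignment)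
def pvB_step (mapping_dict : List (Int × List String)) (is_cat : List Bool) (record : List String)
    (new_record : List String) (p : Int × Int) : List String :=
  if 0 ≤ p.1 ∧ p.1 < (record.length : Int) ∧ PySem.List.pyGetD is_cat p.2 false = true then
    new_record.set p.1.toNat (pvB_restore mapping_dict p.2 (PySem.List.pyGetD record p.1 ""))
  else new_record

def restore_num_to_cat_alt (mapping_dict : List (Int × List String)) (data : List (List String)) (qi_index : List Int) (is_cat : List Bool) : List (List String) :=
  let qi_pairs := pvB_pairs qi_index
  data.map (fun record => qi_pairs.foldl (pvB_step mapping_dict is_cat record) record)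

-- ===== PRECONDITION & SPEC =====
-- Pre_ excludes exactly the inputs where the Python A raises: a QI column whose position
-- overruns is_cat (IndexError), a categorical cell whose token(s) do not parse as int
-- (ValueError), or a range element with no key in mapping_dict (KeyError) or an
-- out-of-range index into its category list (IndexError).
def pvCellOk (mapping_dict : List (Int × List String)) (qi_index : List Int) (is_cat : List Bool) (i : Int) (value : String) : Bool :=
  match PySem.List.index? qi_index i with
  | none => true
  | some pos =>
    if hp : pos < is_cat.length then
      if is_cat[pos] then
        let tokens := (PySem.Str.split? value "~").getD []
        match PySem.Int.ofStr? (PySem.List.pyGetD tokens 0 "") with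
        | none => false
        | some s =>
          match (if tokens.length > 1 then PySem.Int.ofStr? (PySem.List.pyGetD tokens 1 "") else some s) with
          | none => false
          | some e =>
            (PySem.List.pyRange s (e + 1) 1).all (fun j =>
              match PySem.Dict.get? (PySem.Dict.mk mapping_dict) (pos : Int) with
              | none => false
              | some cats => (PySem.List.pyGet? cats j).isSome)
      else true
    else false

def Pre_restore_num_to_cat (mapping_dict : List (Int × List String)) (data : List (List String)) (qi_index : List Int) (is_cat : List Bool) : Prop :=
  ∀ record ∈ data, ∀ iv ∈ PySem.List.enumerate record 0, pvCellOk mapping_dict qi_index is_cat iv.1 iv.2 = true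
instance (mapping_dict : List (Int × List String)) (data : List (List String)) (qi_index : List Int) (is_cat : List Bool) : Decidable (Pre_restore_num_to_cat mapping_dict data qi_index is_cat) := by unfold Pre_restore_num_to_cat; infer_instance

def pvWitness_restore_num_to_cat : (List (Int × List String)) × List (List String) × List Int × List Bool :=
  ([(0, ["low", "mid", "high"])], [["0~2", "x"], ["1", "y"]], [0], [true])

def Spec_restore_num_to_cat (mapping_dict : List (Int × List String)) (data : List (List String)) (qi_index : List Int) (is_cat : List Bool) (out : List (List String)) : Prop := out = restore_num_to_cat_alt mapping_dict data qi_index is_cat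
instance (mapping_dict : List (Int × List String)) (data : List (List String)) (qi_index : List Int) (is_cat : List Bool) (out : List (List String)) : Decidable (Spec_restore_num_to_cat mapping_dict data qi_index is_cat out) := by unfold Spec_restore_num_to_cat; infer_instance

-- ===== CLAIM (what is proved, stated in full; the proofs are below) =====
def Claim_equal_restore_num_to_cat : Prop := ∀ (mapping_dict : List (Int × List String)) (data : List (List String)) (qi_index : List Int) (is_cat : List Bool), Dom_restore_num_to_cat mapping_dict data qi_index is_cat → Pre_restore_num_to_cat mapping_dict data qi_index is_cat → Spec_restore_num_to_cat mapping_dict data qi_index is_cat (restore_num_to_cat mapping_dict data qi_index is_cat)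

-- ===== LEMMAS AND PROOFS =====

-- A's range block computes B's single range.
theorem pvRange_eq (tokens : List String) :
    pvA_range tokens =
      PySem.List.pyRange ((PySem.Int.ofStr? (PySem.List.pyGetD tokens 0 "")).getD 0)
        (pvB_stop tokens + 1) 1 := by
  unfold pvA_range pvB_stop
  by_cases h : tokens.length > 1
  · simp only [h, if_true]
  · simp only [h, if_false]
    exact (PySem.List.pyRange_one_singleton _).symm

-- B's overwrite value is A's restored value.
theorem pvRestore_eq (mapping_dict : List (Int × List String)) (pos : Int) (value : String) :
    pvB_restore mapping_dict pos value =
      pvA_join mapping_dict pos (pvA_range ((PySem.Str.split? value "~").getD [])) := by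
  rw [pvRange_eq]; rfl

-- The overwrite fold preserves the row length.
theorem pvFold_length (mapping_dict : List (Int × List String)) (is_cat : List Bool)
    (record : List String) (pairs : List (Int × Int)) (nr : List String) :
    (pairs.foldl (pvB_step mapping_dict is_cat record) nr).length = nr.length := by
  induction pairs generalizing nr with
  | nil => rfl
  | cons p rest ih =>
    rw [List.foldl_cons, ih]
    unfold pvB_step
    split_ifs <;> simp

-- What the overwrite fold leaves at column k, for pairwise-distinct columns.
theorem pvFold_getElem? (mapping_dict : List (Int × List String)) (is_cat : List Bool)
    (record : List String) (pairs : List (Int × Int))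
    (hnd : (pairs.map Prod.fst).Nodup) (nr : List String) (k : Nat)
    (hk : k < nr.length) (hkr : k < record.length) :
    (pairs.foldl (pvB_step mapping_dict is_cat record) nr)[k]? =
      match pairs.find? (fun p => p.1 == (k : Int) && PySem.List.pyGetD is_cat p.2 false) with
      | some p => some (pvB_restore mapping_dict p.2 (PySem.List.pyGetD record p.1 ""))
      | none => nr[k]? := by
  induction pairs generalizing nr with
  | nil => rfl
  | cons p rest ih =>
    simp only [List.map_cons, List.nodup_cons] at hnd
    obtain ⟨hpn, hrest⟩ := hnd
    rw [List.foldl_cons]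
    by_cases hm : (p.1 == (k : Int) && PySem.List.pyGetD is_cat p.2 false) = true
    · obtain ⟨hpk, hcat⟩ := Bool.and_eq_true_iff.mp hm
      have hpk' : p.1 = (k : Int) := by simpa using hpk
      have hcond : 0 ≤ p.1 ∧ p.1 < (record.length : Int) ∧ PySem.List.pyGetD is_cat p.2 false = true := by
        refine ⟨?_, ?_, hcat⟩ <;> rw [hpk']
        · exact Int.natCast_nonneg k
        · exact_mod_cast hkr
      have hstep : pvB_step mapping_dict is_cat record nr p =
          nr.set k (pvB_restore mapping_dict p.2 (PySem.List.pyGetD record p.1 "")) := by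
        unfold pvB_step
        rw [if_pos hcond, hpk']; norm_num
      have hnone : rest.find? (fun q => q.1 == (k : Int) && PySem.List.pyGetD is_cat q.2 false) = none := by
        rw [List.find?_eq_none]
        intro q hq hqt
        obtain ⟨hqk, _⟩ := Bool.and_eq_true_iff.mp hqt
        exact hpn (by rw [hpk', ← show q.1 = (k : Int) by simpa using hqk]; exact List.mem_map_of_mem hq)
      rw [hstep, ih hrest _ (by simpa using hk), hnone]
      simp only [List.find?_cons, hm]
      rw [List.getElem?_set_self (by simpa using hk)]
    · have hfind : (p :: rest).find? (fun q => q.1 == (k : Int) && PySem.List.pyGetD is_cat q.2 false) =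
          rest.find? (fun q => q.1 == (k : Int) && PySem.List.pyGetD is_cat q.2 false) := by
        rw [Bool.not_eq_true] at hm
        simp only [List.find?_cons, hm]
      have hlen : k < (pvB_step mapping_dict is_cat record nr p).length := by
        unfold pvB_step; split_ifs <;> simpa using hk
      rw [ih hrest _ hlen, hfind]
      have hunch : (pvB_step mapping_dict is_cat record nr p)[k]? = nr[k]? := by
        unfold pvB_step
        split_ifs with hc
        · obtain ⟨h0, _, hcat⟩ := hc
          have hne : p.1.toNat ≠ k := by
            intro he
            apply hm
            have : p.1 = (k : Int) := by omega
            simp [this, hcat]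
          exact List.getElem?_set_ne hne
        · rfl
      cases rest.find? (fun q => q.1 == (k : Int) && PySem.List.pyGetD is_cat q.2 false) with
      | some q => rfl
      | none => exact hunch

-- The distinct-columns list: nodup firsts, and its entries are exactly (i, first index of i).
theorem pvPairs_nodup_fst (qi_index : List Int) : ((pvB_pairs qi_index).map Prod.fst).Nodup := by
  unfold pvB_pairs
  rw [List.map_map]
  have h : (Prod.fst ∘ fun i : Int => (i, (((PySem.List.index? qi_index i).getD 0 : Nat) : Int))) = id := rfl
  rw [h, List.map_id]
  exact PySem.List.nodup_dedup qi_index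

-- find? returns a when the predicate holds only at a and a is in the list.
theorem pvFind?_unique {α : Type} {p : α → Bool} {l : List α} {a : α}
    (ha : a ∈ l) (hpa : p a = true) (hu : ∀ x, p x = true → x = a) : l.find? p = some a := by
  induction l with
  | nil => cases ha
  | cons x xs ih =>
    rw [List.find?_cons]
    cases hx : p x with
    | true => rw [hu x hx]
    | false =>
      rcases List.mem_cons.mp ha with h | h
      · rw [← h, hpa] at hx; cases hx
      · exact ih h

-- A's per-cell transform equals what B's overwrite fold leaves at that cell.
theorem pvCell_eq (mapping_dict : List (Int × List String)) (qi_index : List Int) (is_cat : List Bool)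
    (record : List String) (k : Nat) (hk : k < record.length) :
    ((pvB_pairs qi_index).foldl (pvB_step mapping_dict is_cat record) record)[k]? =
      some (pvA_cell mapping_dict qi_index is_cat (k : Int) (PySem.List.pyGetD record (k : Int) "")) := by
  rw [pvFold_getElem? mapping_dict is_cat record _ (pvPairs_nodup_fst qi_index) record k hk hk]
  unfold pvB_pairs
  rw [List.find?_map]
  unfold pvA_cell
  by_cases hmem : (k : Int) ∈ qi_index
  · have hc : qi_index.contains (k : Int) = true := by simpa using hmem
    obtain ⟨pos, hpos⟩ := Option.isSome_iff_exists.mp ((PySem.List.index?_isSome_iff qi_index _).mpr hmem)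
    by_cases hcat : PySem.List.pyGetD is_cat ((pos : Nat) : Int) false = true
    · have hfind : (PySem.List.dedup qi_index).find?
          ((fun p => p.1 == (k : Int) && PySem.List.pyGetD is_cat p.2 false) ∘
            (fun i => (i, (((PySem.List.index? qi_index i).getD 0 : Nat) : Int)))) = some (k : Int) := by
        have hmem' : (k : Int) ∈ PySem.List.dedup qi_index := by
          rw [PySem.List.dedup_eq_ofList]
          exact (PySem.Set.mem_ofList qi_index _).mpr hmem
        apply pvFind?_unique hmem'
        · simp only [Function.comp_apply, hpos]
          simp [hcat]
        · intro x hxt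
          simp only [Function.comp_apply, Bool.and_eq_true, beq_iff_eq] at hxt
          exact hxt.1
      rw [hfind]
      simp only [Option.map_some, hc, if_true, hpos, Option.getD_some]
      rw [if_pos hcat]
      rw [pvRestore_eq]
    · have hfind : (PySem.List.dedup qi_index).find?
          ((fun p => p.1 == (k : Int) && PySem.List.pyGetD is_cat p.2 false) ∘
            (fun i => (i, (((PySem.List.index? qi_index i).getD 0 : Nat) : Int)))) = none := by
        rw [List.find?_eq_none]
        intro x hx hxt
        simp only [Function.comp_apply, Bool.and_eq_true, beq_iff_eq] at hxt
        obtain ⟨hxk, hxcat⟩ := hxt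
        subst hxk
        rw [hpos] at hxcat
        exact hcat (by simpa using hxcat)
      rw [hfind]
      simp only [Option.map_none, hc, if_true, hpos, Option.getD_some]
      rw [if_neg hcat]
      rw [List.getElem?_eq_getElem hk]
      congr 1
      simp [PySem.List.pyGetD_natCast, List.getD, List.getElem?_eq_getElem hk]
  · have hc : qi_index.contains (k : Int) = false := by simpa using hmem
    have hfind : (PySem.List.dedup qi_index).find?
        ((fun p => p.1 == (k : Int) && PySem.List.pyGetD is_cat p.2 false) ∘
          (fun i => (i, (((PySem.List.index? qi_index i).getD 0 : Nat) : Int)))) = none := by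
      rw [List.find?_eq_none]
      intro x hx hxt
      simp only [Function.comp_apply, Bool.and_eq_true, beq_iff_eq] at hxt
      exact hmem (hxt.1 ▸ ((PySem.Set.mem_ofList qi_index x).mp (by rwa [PySem.List.dedup_eq_ofList] at hx)))
    rw [hfind]
    simp only [Option.map_none, hc, Bool.false_eq_true, if_false]
    rw [List.getElem?_eq_getElem hk]
    congr 1
    simp [PySem.List.pyGetD_natCast, List.getD, List.getElem?_eq_getElem hk]

-- A's row equals B's row.
theorem pvRow_eq (mapping_dict : List (Int × List String)) (qi_index : List Int) (is_cat : List Bool)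
    (record : List String) :
    (PySem.List.pyRange 0 (record.length : Int) 1).foldl (fun new_record i =>
        new_record ++ [pvA_cell mapping_dict qi_index is_cat i (PySem.List.pyGetD record i "")]) [] =
      (pvB_pairs qi_index).foldl (pvB_step mapping_dict is_cat record) record := by
  rw [PySem.List.foldl_append_singleton_eq_map]
  simp only [List.nil_append]
  have hmap : (PySem.List.pyRange 0 (record.length : Int) 1).map
      (fun i => pvA_cell mapping_dict qi_index is_cat i (PySem.List.pyGetD record i "")) =
      (PySem.List.enumerate record 0).map
        (fun iv => pvA_cell mapping_dict qi_index is_cat iv.1 (PySem.List.pyGetD record iv.1 "")) := by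
    rw [PySem.List.enumerate_eq_map_pyRange record "", List.map_map]
    simp [PySem.List.len_eq]
  rw [hmap]
  apply List.ext_getElem?
  intro k
  by_cases hk : k < record.length
  · rw [pvCell_eq mapping_dict qi_index is_cat record k hk]
    rw [List.getElem?_map, PySem.List.getElem?_enumerate]
    rw [List.getElem?_eq_getElem hk]
    simp
  · rw [List.getElem?_eq_none, List.getElem?_eq_none]
    · rw [pvFold_length]; omega
    · rw [List.length_map, PySem.List.length_enumerate]; omega

-- ===== VERDICT (by name: the statement is the Claim_ definition above) =====
theorem restore_num_to_cat_spec : Claim_equal_restore_num_to_cat := by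
  intro mapping_dict data qi_index is_cat _ _
  unfold Spec_restore_num_to_cat restore_num_to_cat restore_num_to_cat_alt
  rw [PySem.List.foldl_append_singleton_eq_map]
  simp only [List.nil_append]
  exact List.map_congr_left fun record _ => pvRow_eq mapping_dict qi_index is_cat record
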